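-- pv_equiv track=rewrite | github.com/sblumenf/podcastknowledge | seeding_pipeline/src/pipeline/feature_integration_framework.py | _find_entities_in_segment
-- ===== SOURCE A (Python) =====
-- from typing import Dict, Any, List, Optional, Tuple
--
-- def _find_entities_in_segment(text: str, entities: List[Dict[str, Any]]) -> List[str]:
--     """Find entity names mentioned in a segment."""
--     found_entities = []
--     text_lower = text.lower()
--
--     for entity in entities:
--         entity_name = entity.get('name', '')
--         if entity_name and entity_name.lower() in text_lower:
--             found_entities.append(entity_name)
--
--     return found_entities
-- ===== SOURCE B (Python) =====
-- def _find_entities_in_segment(text, entities):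
--     """Find entity names mentioned in a segment.
--
--     Different strategy from the per-entity substring search: index the lowered
--     text once by collecting every window whose length occurs among the lowered
--     names into a set, then answer each entity by a single set lookup.
--     """
--     text_lower = text.lower()
--     t = len(text_lower)
--     names = [e.get('name', '') for e in entities]
--     lengths = {len(n.lower()) for n in names}
--     subs = set()
--     for ln in lengths:
--         for i in range(t - ln + 1):
--             subs.add(text_lower[i:i + ln])
--     return [n for n in names if n and n.lower() in subs]
-- ===== Notes on version B (the rewrite author's own statement) =====
-- stated objective: alternative
-- what changed: B indexes the lowered text once, collecting every window whose length occurs among the lowered names into a set (nested loops over lengths and positions), then answers each entity name by a single set lookup instead of A's per-entity substring search.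
import Mathlib
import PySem

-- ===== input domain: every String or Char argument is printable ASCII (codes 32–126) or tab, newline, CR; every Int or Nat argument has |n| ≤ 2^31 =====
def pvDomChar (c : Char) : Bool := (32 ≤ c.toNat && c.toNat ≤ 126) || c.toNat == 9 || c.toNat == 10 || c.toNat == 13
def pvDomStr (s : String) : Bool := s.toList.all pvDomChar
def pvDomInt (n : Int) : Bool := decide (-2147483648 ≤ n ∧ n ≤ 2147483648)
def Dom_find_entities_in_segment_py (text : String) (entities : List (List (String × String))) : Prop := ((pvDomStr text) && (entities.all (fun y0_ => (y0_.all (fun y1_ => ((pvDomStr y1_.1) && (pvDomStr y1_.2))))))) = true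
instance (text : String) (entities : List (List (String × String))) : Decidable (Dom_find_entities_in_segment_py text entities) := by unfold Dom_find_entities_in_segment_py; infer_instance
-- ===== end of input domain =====

-- B indexes the lowered text once by a set of all its windows of the lengths occurring among the lowered names, then answers each entity by one set lookup; alternative structure, same result.

-- ===== PORT A =====
-- literal transliteration of A: one loop over entities, lower + substring test per entity
def find_entities_in_segment_py (text : String) (entities : List (List (String × String))) : List String :=
  let text_lower := PySem.Str.lower text
  entities.foldl
    (fun found_entities entity =>
      let entity_name := (PySem.Dict.mk entity).getD "name" ""
      if decide (entity_name ≠ "") && PySem.Str.isIn (PySem.Str.lower entity_name) text_lower then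
        found_entities ++ [entity_name]
      else
        found_entities)
    []

-- ===== PORT B =====
-- transliteration of Source B: names pass, set of occurring lowered-name lengths, nested loops building
-- the window set (the 'for ln in lengths' set iteration only builds another set, so its order cannot
-- affect the result), then one filtering pass with a set lookup per name
def find_entities_in_segment_py_alt (text : String) (entities : List (List (String × String))) : List String :=
  let text_lower := PySem.Str.lower text
  let t := PySem.Str.len text_lower
  let names := entities.map (fun e => (PySem.Dict.mk e).getD "name" "")
  let lengths : PySem.Set Int := PySem.Set.ofList (names.map (fun n => PySem.Str.len (PySem.Str.lower n)))
  let subs := lengths.foldl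
    (fun s ln =>
      (PySem.List.pyRange 0 (t - ln + 1)).foldl
        (fun s i => PySem.Set.add s (PySem.Str.slice text_lower (some i) (some (i + ln)))) s)
    PySem.Set.empty
  names.filter (fun n => decide (n ≠ "") && PySem.Set.contains subs (PySem.Str.lower n))

-- ===== PRECONDITION & SPEC =====
def Spec_find_entities_in_segment_py (text : String) (entities : List (List (String × String))) (out : List String) : Prop := out = find_entities_in_segment_py_alt text entities
instance (text : String) (entities : List (List (String × String))) (out : List String) : Decidable (Spec_find_entities_in_segment_py text entities out) := by unfold Spec_find_entities_in_segment_py; infer_instance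

-- ===== CLAIM (what is proved, stated in full; the proofs are below) =====
def Claim_equal_find_entities_in_segment_py : Prop := ∀ (text : String) (entities : List (List (String × String))), Dom_find_entities_in_segment_py text entities → Spec_find_entities_in_segment_py text entities (find_entities_in_segment_py text entities)

-- ===== LEMMAS AND PROOFS =====

-- membership after folding Set.add of g over a list
lemma pvMem_foldl_add (L : List Int) (g : Int → String) (s : PySem.Set String) (x : String) :
    x ∈ L.foldl (fun s j => PySem.Set.add s (g j)) s ↔ x ∈ s ∨ ∃ j ∈ L, x = g j := by
  induction L generalizing s with
  | nil => simp
  | cons j L ih =>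
    simp only [List.foldl_cons, ih, PySem.Set.mem_add, List.mem_cons]
    constructor
    · rintro (⟨h | rfl⟩ | ⟨k, hk, rfl⟩)
      · exact Or.inl h
      · exact Or.inr ⟨j, Or.inl rfl, rfl⟩
      · exact Or.inr ⟨k, Or.inr hk, rfl⟩
    · rintro (h | ⟨k, (rfl | hk), rfl⟩)
      · exact Or.inl (Or.inl h)
      · exact Or.inl (Or.inr rfl)
      · exact Or.inr ⟨k, hk, rfl⟩

-- membership in the double fold building the window set
lemma pvMem_subs (tl : String) (t : Int) (Ls : List Int) (s : PySem.Set String) (x : String) :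
    x ∈ Ls.foldl (fun s ln =>
        (PySem.List.pyRange 0 (t - ln + 1)).foldl
          (fun s i => PySem.Set.add s (PySem.Str.slice tl (some i) (some (i + ln)))) s) s
      ↔ x ∈ s ∨ ∃ ln ∈ Ls, ∃ i ∈ PySem.List.pyRange 0 (t - ln + 1),
          x = PySem.Str.slice tl (some i) (some (i + ln)) := by
  induction Ls generalizing s with
  | nil => simp
  | cons ln Ls ih =>
    simp only [List.foldl_cons, ih, pvMem_foldl_add, List.mem_cons]
    constructor
    · rintro (⟨h | ⟨i, hi, rfl⟩⟩ | ⟨k, hk, i, hi, rfl⟩)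
      · exact Or.inl h
      · exact Or.inr ⟨ln, Or.inl rfl, i, hi, rfl⟩
      · exact Or.inr ⟨k, Or.inr hk, i, hi, rfl⟩
    · rintro (h | ⟨k, (rfl | hk), i, hi, rfl⟩)
      · exact Or.inl (Or.inl h)
      · exact Or.inl (Or.inr ⟨i, hi, rfl⟩)
      · exact Or.inr ⟨k, hk, i, hi, rfl⟩

-- any slice of tl is an infix of tl
lemma pvSlice_infix (tl : String) (a b : Option Int) :
    (PySem.Str.slice tl a b).toList <:+: tl.toList := by
  simp only [PySem.Str.slice, String.toList_ofList]
  exact ((List.take_prefix _ _).isInfix).trans ((List.drop_suffix _ _).isInfix)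

-- every infix of tl is a window of tl of its own length
lemma pvInfix_slice (tl : String) (x : String) (h : x.toList <:+: tl.toList) :
    ∃ i ∈ PySem.List.pyRange 0 (PySem.Str.len tl - PySem.Str.len x + 1),
      x = PySem.Str.slice tl (some i) (some (i + PySem.Str.len x)) := by
  obtain ⟨s1, s2, hsplit⟩ := h
  have hle : s1.length + x.toList.length ≤ tl.toList.length := by
    rw [← hsplit]; simp
  refine ⟨(s1.length : Int), ?_, ?_⟩
  · rw [PySem.List.mem_pyRange_one, PySem.Str.len_eq, PySem.Str.len_eq]
    constructor
    · positivity
    · omega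
  · have hcast : (s1.length : Int) + PySem.Str.len x = ((s1.length + x.toList.length : Nat) : Int) := by
      rw [PySem.Str.len_eq]; push_cast; ring
    rw [hcast]
    have hs := PySem.List.slice_natCast tl.toList s1.length (s1.length + x.toList.length)
    apply String.toList_inj.mp
    have hsl : (PySem.Str.slice tl (some (s1.length : Int)) (some ((s1.length + x.toList.length : Nat) : Int))).toList
        = List.take (s1.length + x.toList.length - s1.length) (List.drop s1.length tl.toList) := by
      simp [PySem.Str.slice]
      simpa using hs
    rw [hsl, ← hsplit]
    simp

-- the key fact: the window set answers exactly the substring test, for any looked-up string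
-- whose length is among the indexed lengths
lemma pvSubs_lookup (tl : String) (Ls : List Int) (x : String) (hln : PySem.Str.len x ∈ Ls) :
    PySem.Set.contains
      (Ls.foldl (fun s ln =>
          (PySem.List.pyRange 0 (PySem.Str.len tl - ln + 1)).foldl
            (fun s i => PySem.Set.add s (PySem.Str.slice tl (some i) (some (i + ln)))) s)
        PySem.Set.empty) x
      = PySem.Str.isIn x tl := by
  rw [Bool.eq_iff_iff, PySem.Str.isIn_iff_infix]
  have hc : ∀ (s : PySem.Set String), PySem.Set.contains s x = true ↔ x ∈ s := by
    intro s; simp [PySem.Set.contains]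
  rw [hc, pvMem_subs]
  constructor
  · rintro (h | ⟨ln, _, i, _, rfl⟩)
    · simp [PySem.Set.empty] at h
    · exact pvSlice_infix tl _ _
  · intro h
    obtain ⟨i, hi, hx⟩ := pvInfix_slice tl x h
    exact Or.inr ⟨PySem.Str.len x, hln, i, hi, hx⟩

-- ===== VERDICT (by name: the statement is the Claim_ definition above) =====
theorem find_entities_in_segment_py_spec : Claim_equal_find_entities_in_segment_py := by
  intro text entities _
  unfold Spec_find_entities_in_segment_py find_entities_in_segment_py find_entities_in_segment_py_alt
  simp only []
  rw [PySem.List.foldl_append_if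
      (fun entity => decide (((PySem.Dict.mk entity).getD "name" "") ≠ "")
        && PySem.Str.isIn (PySem.Str.lower ((PySem.Dict.mk entity).getD "name" "")) (PySem.Str.lower text))
      (fun entity => (PySem.Dict.mk entity).getD "name" "")]
  rw [List.nil_append, List.filter_map]
  refine congrArg (List.map (fun e => (PySem.Dict.mk e).getD "name" "")) (List.filter_congr ?_)
  intro e he
  simp only [Function.comp_apply]
  rw [pvSubs_lookup]
  rw [PySem.Set.mem_ofList]
  exact List.mem_map_of_mem (List.mem_map_of_mem he)
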